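-- pv_equiv track=rewrite | github.com/ThreatFlux/threatflux-threat-detection | generate_combined_training_data.py | _create_library_answer
-- ===== SOURCE A (Python) =====
-- from typing import Dict, List, Any
--
-- def _create_library_answer(file_name: str, libs: List[str],
--                           expertise: str) -> str:
--     """Create answer about library dependencies."""
--     lines = [f"# Library Dependencies of {file_name}\n"]
--
--     lines.append(f"The binary uses {len(libs)} shared libraries:\n")
--
--     # Group common libraries
--     system_libs = [l for l in libs if 'libc.so' in l or 'libpthread' in l]
--     security_libs = [l for l in libs if 'libssl' in l or 'libcrypto' in l]
--
--     if system_libs: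
--         lines.append("## System Libraries")
--         for lib in system_libs[:5]:
--             lines.append(f"- `{lib}` - Core system functionality")
--
--     if security_libs:
--         lines.append("\n## Security Libraries")
--         for lib in security_libs:
--             lines.append(f"- `{lib}` - Cryptographic operations")
--
--     # Other libraries
--     other_libs = [l for l in libs if l not in system_libs + security_libs]
--     if other_libs:
--         lines.append("\n## Additional Libraries")
--         for lib in other_libs[:10]:
--             lines.append(f"- `{lib}`")
--
--     return '\n'.join(lines)
-- ===== SOURCE B (Python) =====
-- def _create_library_answer(file_name, libs, expertise):
--     """Create answer about library dependencies (single-pass classification)."""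
--     system_libs, security_libs, other_libs = [], [], []
--     for lib in libs:
--         is_system = 'libc.so' in lib or 'libpthread' in lib
--         is_security = 'libssl' in lib or 'libcrypto' in lib
--         if is_system:
--             system_libs.append(lib)
--         if is_security:
--             security_libs.append(lib)
--         if not (is_system or is_security):
--             other_libs.append(lib)
--     parts = [f"# Library Dependencies of {file_name}\n",
--              f"The binary uses {len(libs)} shared libraries:\n"]
--     if system_libs:
--         parts.append("## System Libraries")
--         parts.extend(f"- `{lib}` - Core system functionality" for lib in system_libs[:5])
--     if security_libs:
--         parts.append("\n## Security Libraries")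
--         parts.extend(f"- `{lib}` - Cryptographic operations" for lib in security_libs)
--     if other_libs:
--         parts.append("\n## Additional Libraries")
--         parts.extend(f"- `{lib}`" for lib in other_libs[:10])
--     return '\n'.join(parts)
-- ===== Notes on version B (the rewrite author's own statement) =====
-- stated objective: alternative
-- what changed: One pass over libs maintaining three accumulators with independent is_system/is_security booleans replaces A's three separate list comprehensions and the O(n^2) 'l not in system_libs + security_libs' membership scan.
import Mathlib
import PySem

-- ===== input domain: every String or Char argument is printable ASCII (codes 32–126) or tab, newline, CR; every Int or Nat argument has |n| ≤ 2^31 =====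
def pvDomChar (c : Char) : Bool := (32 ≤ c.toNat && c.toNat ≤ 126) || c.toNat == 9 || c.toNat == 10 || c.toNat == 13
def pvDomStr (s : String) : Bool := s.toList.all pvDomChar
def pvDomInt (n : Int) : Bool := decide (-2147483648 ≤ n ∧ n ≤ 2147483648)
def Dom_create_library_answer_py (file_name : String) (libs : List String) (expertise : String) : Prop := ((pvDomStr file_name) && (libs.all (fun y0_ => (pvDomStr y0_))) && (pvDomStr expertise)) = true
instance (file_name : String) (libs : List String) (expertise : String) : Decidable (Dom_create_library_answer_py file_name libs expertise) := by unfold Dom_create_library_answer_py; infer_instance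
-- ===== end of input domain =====

-- B replaces A's three comprehensions and quadratic membership scan with one pass
-- keeping three accumulators (alternative decomposition; same output proved equal).


-- ===== PORT A =====
-- 'libc.so' in l or 'libpthread' in l
def pvIsSystem (l : String) : Bool := PySem.Str.isIn "libc.so" l || PySem.Str.isIn "libpthread" l
-- 'libssl' in l or 'libcrypto' in l
def pvIsSecurity (l : String) : Bool := PySem.Str.isIn "libssl" l || PySem.Str.isIn "libcrypto" l

def create_library_answer_py (file_name : String) (libs : List String) (expertise : String) : String :=
  let lines : List String := ["# Library Dependencies of " ++ file_name ++ "\n"]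
  let lines := lines ++ ["The binary uses " ++ PySem.Int.toStr (libs.length : Int) ++ " shared libraries:\n"]
  let system_libs := libs.filter (fun l => pvIsSystem l)
  let security_libs := libs.filter (fun l => pvIsSecurity l)
  let lines :=
    if system_libs ≠ [] then
      (PySem.List.slice system_libs none (some 5)).foldl
        (fun acc lib => acc ++ ["- `" ++ lib ++ "` - Core system functionality"])
        (lines ++ ["## System Libraries"])
    else lines
  let lines :=
    if security_libs ≠ [] then
      security_libs.foldl
        (fun acc lib => acc ++ ["- `" ++ lib ++ "` - Cryptographic operations"])
        (lines ++ ["\n## Security Libraries"])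
    else lines
  let other_libs := libs.filter (fun l => !((system_libs ++ security_libs).contains l))
  let lines :=
    if other_libs ≠ [] then
      (PySem.List.slice other_libs none (some 10)).foldl
        (fun acc lib => acc ++ ["- `" ++ lib ++ "`"])
        (lines ++ ["\n## Additional Libraries"])
    else lines
  PySem.Str.join "\n" lines

-- ===== PORT B =====
def create_library_answer_py_alt (file_name : String) (libs : List String) (expertise : String) : String :=
  let acc := libs.foldl
    (fun (acc : List String × List String × List String) lib =>
      let is_system := pvIsSystem lib
      let is_security := pvIsSecurity lib
      (if is_system then acc.1 ++ [lib] else acc.1,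
       if is_security then acc.2.1 ++ [lib] else acc.2.1,
       if !(is_system || is_security) then acc.2.2 ++ [lib] else acc.2.2))
    ([], [], [])
  let system_libs := acc.1
  let security_libs := acc.2.1
  let other_libs := acc.2.2
  let parts : List String :=
    ["# Library Dependencies of " ++ file_name ++ "\n",
     "The binary uses " ++ PySem.Int.toStr (libs.length : Int) ++ " shared libraries:\n"]
  let parts :=
    if system_libs ≠ [] then
      parts ++ ["## System Libraries"] ++
        (system_libs.take 5).map (fun lib => "- `" ++ lib ++ "` - Core system functionality")
    else parts
  let parts :=
    if security_libs ≠ [] then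
      parts ++ ["\n## Security Libraries"] ++
        security_libs.map (fun lib => "- `" ++ lib ++ "` - Cryptographic operations")
    else parts
  let parts :=
    if other_libs ≠ [] then
      parts ++ ["\n## Additional Libraries"] ++
        (other_libs.take 10).map (fun lib => "- `" ++ lib ++ "`")
    else parts
  PySem.Str.join "\n" parts

-- ===== PRECONDITION & SPEC =====
def Spec_create_library_answer_py (file_name : String) (libs : List String) (expertise : String) (out : String) : Prop := out = create_library_answer_py_alt file_name libs expertise
instance (file_name : String) (libs : List String) (expertise : String) (out : String) : Decidable (Spec_create_library_answer_py file_name libs expertise out) := by unfold Spec_create_library_answer_py; infer_instance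

-- ===== CLAIM (what is proved, stated in full; the proofs are below) =====
def Claim_equal_create_library_answer_py : Prop := ∀ (file_name : String) (libs : List String) (expertise : String), Dom_create_library_answer_py file_name libs expertise → Spec_create_library_answer_py file_name libs expertise (create_library_answer_py file_name libs expertise)

-- ===== LEMMAS AND PROOFS =====

-- xs[:5] and xs[:10] are take 5 / take 10.
theorem pv_slice_to_5 (xs : List String) : PySem.List.slice xs none (some 5) = xs.take 5 := by
  simp [pysem]
theorem pv_slice_to_10 (xs : List String) : PySem.List.slice xs none (some 10) = xs.take 10 := by
  simp [pysem]

-- B's single fold computes exactly A's three filters.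
theorem pv_fold_eq_filters (libs : List String)
    (sys sec oth : List String) :
    libs.foldl
      (fun (acc : List String × List String × List String) lib =>
        let is_system := pvIsSystem lib
        let is_security := pvIsSecurity lib
        (if is_system then acc.1 ++ [lib] else acc.1,
         if is_security then acc.2.1 ++ [lib] else acc.2.1,
         if !(is_system || is_security) then acc.2.2 ++ [lib] else acc.2.2))
      (sys, sec, oth)
    = (sys ++ libs.filter (fun l => pvIsSystem l),
       sec ++ libs.filter (fun l => pvIsSecurity l),
       oth ++ libs.filter (fun l => !(pvIsSystem l || pvIsSecurity l))) := by
  induction libs generalizing sys sec oth with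
  | nil => simp
  | cons x xs ih =>
    simp only [List.foldl_cons, List.filter_cons]
    rw [ih]
    by_cases h1 : pvIsSystem x = true <;> by_cases h2 : pvIsSecurity x = true <;>
      simp [h1, h2]

-- A's 'l not in system_libs + security_libs' (for l drawn from libs) is exactly '¬(is_system ∨ is_security)'.
theorem pv_other_filter_eq (libs : List String) :
    libs.filter (fun l =>
      !((libs.filter (fun l' => pvIsSystem l') ++ libs.filter (fun l' => pvIsSecurity l')).contains l))
    = libs.filter (fun l => !(pvIsSystem l || pvIsSecurity l)) := by
  apply List.filter_congr
  intro l hl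
  simp [List.mem_filter, hl]

-- ===== VERDICT (by name: the statement is the Claim_ definition above) =====
theorem create_library_answer_py_spec : Claim_equal_create_library_answer_py := by
  intro file_name libs expertise _
  show create_library_answer_py file_name libs expertise = create_library_answer_py_alt file_name libs expertise
  unfold create_library_answer_py create_library_answer_py_alt
  simp only [pv_fold_eq_filters, List.nil_append, pv_other_filter_eq,
    pv_slice_to_5, pv_slice_to_10, PySem.List.foldl_append_singleton_eq_map, List.map_take,
    List.singleton_append, List.cons_append, List.append_assoc]
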